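-- pv_equiv track=rewrite | github.com/hmgu-itg/burden_testing | python/burden/utils.py | getMostSevereEffect
-- ===== SOURCE A (Python) =====
-- def getMostSevereEffect(effects,severity_scores):
--     max_score=0
--     max_effect=None
--     for e in effects:
--         if e in severity_scores:
--             if severity_scores[e]>max_score:
--                 max_score=severity_scores[e]
--                 max_effect=e
--         else:
--             if max_effect is None:
--                 max_effect=e
--     return max_effect
-- ===== SOURCE B (Python) =====
-- def getMostSevereEffect(effects, severity_scores):
--     scored = [e for e in effects if e in severity_scores and severity_scores[e] > 0]
--     if scored:
--         return max(scored, key=lambda e: severity_scores[e])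
--     return next((e for e in effects if e not in severity_scores), None)
-- ===== Notes on version B (the rewrite author's own statement) =====
-- stated objective: idiomatic
-- what changed: A fuses the scored maximum and the first-unmatched fallback into one loop over a shared None sentinel; B filters the positively-scored effects and takes max(..., key=score) (first maximal on ties), falling back to next() over the effects absent from the score dict.
import Mathlib
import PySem

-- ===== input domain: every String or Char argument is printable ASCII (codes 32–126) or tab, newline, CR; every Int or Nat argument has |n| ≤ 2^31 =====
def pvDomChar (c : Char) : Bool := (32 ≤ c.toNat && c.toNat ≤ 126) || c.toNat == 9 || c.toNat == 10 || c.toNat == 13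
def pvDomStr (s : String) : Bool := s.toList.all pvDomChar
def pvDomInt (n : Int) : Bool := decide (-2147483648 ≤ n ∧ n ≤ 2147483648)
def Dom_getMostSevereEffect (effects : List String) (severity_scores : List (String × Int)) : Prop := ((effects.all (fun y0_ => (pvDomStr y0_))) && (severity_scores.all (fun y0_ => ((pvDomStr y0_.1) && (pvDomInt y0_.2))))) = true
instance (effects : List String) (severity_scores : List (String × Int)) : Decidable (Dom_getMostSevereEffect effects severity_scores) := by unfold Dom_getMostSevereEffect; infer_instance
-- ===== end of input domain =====

-- B replaces A's fused sentinel loop by a filter of the positively-scored effects, a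
-- max(..., key=score) over them (first maximal on ties), and a first-unmatched fallback
-- (objective: idiomatic). Return values proved equal on all inputs.

-- ===== PORT A =====
-- assoc-list lookup, first match = Python dict lookup under the type convention
def lookupScore (severity_scores : List (String × Int)) (e : String) : Option Int :=
  (severity_scores.find? (fun p => p.1 == e)).map Prod.snd

-- one loop body step of A: state = (max_score, max_effect)
def stepA (severity_scores : List (String × Int)) (st : Int × Option String) (e : String) :
    Int × Option String :=
  match lookupScore severity_scores e with
  | some v => if v > st.1 then (v, some e) else st
  | none => if st.2 = none then (st.1, some e) else st

def getMostSevereEffect (effects : List String) (severity_scores : List (String × Int)) : Option String :=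
  (effects.foldl (stepA severity_scores) (0, none)).2

-- ===== PORT B =====
-- B's dict lookup (first matching key, like Python's dict under the convention)
def scoreOf (severity_scores : List (String × Int)) (e : String) : Option Int :=
  severity_scores.lookup e

-- the comprehension filter: 'e in severity_scores and severity_scores[e] > 0'
def posScored (severity_scores : List (String × Int)) (e : String) : Bool :=
  match scoreOf severity_scores e with
  | some v => decide (0 < v)
  | none => false

def getMostSevereEffect_alt (effects : List String) (severity_scores : List (String × Int)) : Option String :=
  let scored := effects.filter (posScored severity_scores)
  -- max(scored, key=...) on a nonempty list; key (scoreOf …).getD 0 is exact since every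
  -- element of scored has a present key; max? = none exactly when scored is empty
  match PySem.List.max? scored (fun e => (scoreOf severity_scores e).getD 0) with
  | some m => some m
  | none => effects.find? (fun e => (scoreOf severity_scores e).isNone)

-- ===== PRECONDITION & SPEC =====
def Spec_getMostSevereEffect (effects : List String) (severity_scores : List (String × Int)) (out : Option String) : Prop := out = getMostSevereEffect_alt effects severity_scores
instance (effects : List String) (severity_scores : List (String × Int)) (out : Option String) : Decidable (Spec_getMostSevereEffect effects severity_scores out) := by unfold Spec_getMostSevereEffect; infer_instance

-- ===== CLAIM (what is proved, stated in full; the proofs are below) =====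
def Claim_equal_getMostSevereEffect : Prop := ∀ (effects : List String) (severity_scores : List (String × Int)), Dom_getMostSevereEffect effects severity_scores → Spec_getMostSevereEffect effects severity_scores (getMostSevereEffect effects severity_scores)

-- ===== LEMMAS AND PROOFS =====

-- the two lookups agree (String's == is propositional equality both ways)
lemma scoreOf_eq (ss : List (String × Int)) (e : String) :
    scoreOf ss e = lookupScore ss e := by
  induction ss with
  | nil => rfl
  | cons p t ih =>
    simp only [scoreOf, lookupScore, List.lookup, List.find?] at *
    by_cases h : p.1 = e
    · simp [h]
    · have h1 : (e == p.1) = false := by simp [Ne.symm h]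
      have h2 : (p.1 == e) = false := by simp [h]
      simp only [h1, h2]
      exact ih

-- the step function of PySem.List.max? with B's key, named for the proofs
def mstep (ss : List (String × Int)) (acc : Option String) (x : String) : Option String :=
  match acc with
  | none => some x
  | some m => if (scoreOf ss m).getD 0 < (scoreOf ss x).getD 0 then some x else some m

lemma max?_eq_foldl (ss : List (String × Int)) (xs : List String) :
    PySem.List.max? xs (fun e => (scoreOf ss e).getD 0) = xs.foldl (mstep ss) none := by
  unfold PySem.List.max? mstep
  congr 1
  funext acc x
  cases acc <;> simp

-- once some, the max? accumulator stays some
lemma mstep_some (ss : List (String × Int)) :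
    ∀ (xs : List String) (b : String), (xs.foldl (mstep ss) (some b)).isSome := by
  intro xs
  induction xs with
  | nil => intro b; rfl
  | cons x t ih =>
    intro b
    simp only [List.foldl, mstep]
    split <;> exact ih _

-- A's loop from a positively-scored winner state equals max?'s fold from that winner
lemma invA (ss : List (String × Int)) :
    ∀ (es : List String) (b : String) (s : Int),
      lookupScore ss b = some s → 0 < s →
      (es.foldl (stepA ss) (s, some b)).2 =
        (es.filter (posScored ss)).foldl (mstep ss) (some b) := by
  intro es
  induction es with
  | nil => intros; rfl
  | cons e t ih =>
    intro b s hb hs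
    simp only [List.foldl, List.filter, stepA, posScored, ← scoreOf_eq] at *
    cases h : scoreOf ss e with
    | none => simpa [h] using ih b s hb hs
    | some v =>
      by_cases hv : v > s
      · have hv0 : (0 : Int) < v := lt_trans hs hv
        simp only [if_pos hv, decide_eq_true hv0, List.foldl, mstep, hb, h,
          Option.getD_some]
        exact ih e v h hv0
      · by_cases hv0 : (0 : Int) < v
        · simp only [if_neg hv, decide_eq_true hv0, List.foldl, mstep, hb, h,
            Option.getD_some]
          exact ih b s hb hs
        · simp only [if_neg hv, decide_eq_false hv0]
          exact ih b s hb hs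
-- A's loop from an unmatched-fallback state (max_score still 0)
lemma invF (ss : List (String × Int)) :
    ∀ (es : List String) (f : String),
      (es.foldl (stepA ss) (0, some f)).2 =
        (match (es.filter (posScored ss)).foldl (mstep ss) none with
         | some m => some m
         | none => some f) := by
  intro es
  induction es with
  | nil => intro f; rfl
  | cons e t ih =>
    intro f
    simp only [List.foldl, List.filter, stepA, posScored, ← scoreOf_eq]
    cases h : scoreOf ss e with
    | none => simpa using ih f
    | some v =>
      by_cases hv0 : (0 : Int) < v
      · simp only [if_pos hv0, decide_eq_true hv0, List.foldl, mstep]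
        rw [scoreOf_eq] at h
        rw [invA ss t e v h hv0]
        cases hb : (List.filter (posScored ss) t).foldl (mstep ss) (some e) with
        | none => have := mstep_some ss (List.filter (posScored ss) t) e
                  rw [hb] at this; cases this
        | some m => rfl
      · simp only [if_neg hv0, decide_eq_false hv0]
        exact ih f

-- A's loop from the initial state against B's whole expression
lemma invMain (ss : List (String × Int)) :
    ∀ (es : List String),
      (es.foldl (stepA ss) (0, none)).2 =
        (match (es.filter (posScored ss)).foldl (mstep ss) none with
         | some m => some m
         | none => es.find? (fun e => (scoreOf ss e).isNone)) := by
  intro es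
  induction es with
  | nil => rfl
  | cons e t ih =>
    simp only [List.foldl, List.filter, stepA, posScored, List.find?, ← scoreOf_eq]
    cases h : scoreOf ss e with
    | none =>
      simp only [Option.isNone_none]
      have := invF ss t e
      simpa using this
    | some v =>
      by_cases hv0 : (0 : Int) < v
      · simp only [if_pos hv0, decide_eq_true hv0, List.foldl, mstep, Option.isNone_some]
        rw [scoreOf_eq] at h
        rw [invA ss t e v h hv0]
        cases hb : (List.filter (posScored ss) t).foldl (mstep ss) (some e) with
        | none => have := mstep_some ss (List.filter (posScored ss) t) e
                  rw [hb] at this; cases this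
        | some m => rfl
      · simp only [if_neg hv0, decide_eq_false hv0, Option.isNone_some]
        exact ih

-- ===== VERDICT (by name: the statement is the Claim_ definition above) =====
theorem getMostSevereEffect_spec : Claim_equal_getMostSevereEffect := by
  intro effects severity_scores _
  unfold Spec_getMostSevereEffect getMostSevereEffect getMostSevereEffect_alt
  simp only [max?_eq_foldl]
  exact invMain severity_scores effects
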